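-- pv_equiv track=rewrite | github.com/mvjacobs/Crone | TweetProcessor/analysis/TweetAnalysis.py | get_emoticon_sentiment
-- ===== SOURCE A (Python) =====
-- def get_emoticon_sentiment(tokens):
--     positive_emoticons = [':)', ':-)', ':=)', ':D', ':-D', ':=D', '^_^', ';)', ';-)', ';=)']
--     negative_emoticons = [':(', ':-(', ':=(', ":'(", ';(', ';-(', ';=(']
--
--     score = 0
--     for token in tokens:
--         if token in positive_emoticons:
--             score += 1
--         if token in negative_emoticons:
--             score -= 1
--
--     return score
-- ===== SOURCE B (Python) =====
-- from collections import Counter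
--
-- def get_emoticon_sentiment(tokens):
--     positive_emoticons = [':)', ':-)', ':=)', ':D', ':-D', ':=D', '^_^', ';)', ';-)', ';=)']
--     negative_emoticons = [':(', ':-(', ':=(', ":'(", ';(', ';-(', ';=(']
--
--     counts = Counter(tokens)
--     return (sum(counts[e] for e in positive_emoticons)
--             - sum(counts[e] for e in negative_emoticons))
-- ===== Notes on version B (the rewrite author's own statement) =====
-- stated objective: faster
-- what changed: B builds a Counter of all tokens in one pass and then iterates over the two fixed emoticon lists summing their counts, instead of scanning both emoticon lists for every token.
import Mathlib
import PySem

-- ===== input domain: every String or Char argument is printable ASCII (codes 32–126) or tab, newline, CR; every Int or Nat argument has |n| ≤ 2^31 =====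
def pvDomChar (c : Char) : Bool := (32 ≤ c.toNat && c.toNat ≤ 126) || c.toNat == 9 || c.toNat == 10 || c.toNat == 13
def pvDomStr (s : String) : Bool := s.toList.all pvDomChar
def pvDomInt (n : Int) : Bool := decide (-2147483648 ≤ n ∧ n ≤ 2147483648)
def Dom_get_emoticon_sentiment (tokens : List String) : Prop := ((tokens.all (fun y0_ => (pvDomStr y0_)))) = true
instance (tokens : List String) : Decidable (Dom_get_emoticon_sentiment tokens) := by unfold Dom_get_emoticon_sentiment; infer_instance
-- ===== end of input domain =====

-- B replaces the per-token membership scans by a Counter built once plus sums over the fixed emoticon lists (idiomatic/one-pass).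
-- ===== PORT A =====
def pvPos : List String := [":)", ":-)", ":=)", ":D", ":-D", ":=D", "^_^", ";)", ";-)", ";=)"]
def pvNeg : List String := [":(", ":-(", ":=(", ":'(", ";(", ";-(", ";=("]

def get_emoticon_sentiment (tokens : List String) : Int :=
  tokens.foldl (fun score token =>
    let score := if token ∈ pvPos then score + 1 else score
    if token ∈ pvNeg then score - 1 else score) 0

-- ===== PORT B =====
def get_emoticon_sentiment_alt (tokens : List String) : Int :=
  let counts := PySem.Dict.counter tokens
  ((pvPos.map (fun e => counts.getD e 0)).sum)
    - ((pvNeg.map (fun e => counts.getD e 0)).sum)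

-- ===== PRECONDITION & SPEC =====
def Spec_get_emoticon_sentiment (tokens : List String) (out : Int) : Prop := out = get_emoticon_sentiment_alt tokens
instance (tokens : List String) (out : Int) : Decidable (Spec_get_emoticon_sentiment tokens out) := by unfold Spec_get_emoticon_sentiment; infer_instance

-- ===== CLAIM (what is proved, stated in full; the proofs are below) =====
def Claim_equal_get_emoticon_sentiment : Prop := ∀ (tokens : List String), Dom_get_emoticon_sentiment tokens → Spec_get_emoticon_sentiment tokens (get_emoticon_sentiment tokens)

-- ===== LEMMAS AND PROOFS =====

-- counting a new head token adds 1 to the summed counts exactly when it is in the (nodup) key list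
theorem pv_sum_count_cons (l : List String) (hl : l.Nodup) (t : String) (ts : List String) :
    (l.map (fun e => ((t :: ts).count e : Int))).sum
      = (l.map (fun e => (ts.count e : Int))).sum + (if t ∈ l then 1 else 0) := by
  induction l with
  | nil => simp
  | cons a l ih =>
    simp only [List.nodup_cons] at hl
    rw [List.map_cons, List.map_cons, List.sum_cons, List.sum_cons, ih hl.2, List.count_cons]
    simp only [List.mem_cons]
    by_cases h : t = a
    · subst h
      simp [hl.1]
      push_cast
      ring
    · have h' : ¬ (a = t) := Ne.symm h
      simp only [h, false_or, beq_iff_eq, h', if_false]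
      split_ifs <;> push_cast <;> ring

theorem pv_foldl_eq (ts : List String) : ∀ (s : Int),
    ts.foldl (fun score token =>
      let score := if token ∈ pvPos then score + 1 else score
      if token ∈ pvNeg then score - 1 else score) s
    = s + (pvPos.map (fun e => (ts.count e : Int))).sum
        - (pvNeg.map (fun e => (ts.count e : Int))).sum := by
  induction ts with
  | nil => intro s; simp
  | cons t ts ih =>
    intro s
    have hp : pvPos.Nodup := by decide
    have hn : pvNeg.Nodup := by decide
    simp only [List.foldl_cons, ih, pv_sum_count_cons pvPos hp t ts,
      pv_sum_count_cons pvNeg hn t ts]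
    split_ifs <;> ring

-- ===== VERDICT (by name: the statement is the Claim_ definition above) =====
theorem get_emoticon_sentiment_spec : Claim_equal_get_emoticon_sentiment := by
  intro tokens _
  unfold Spec_get_emoticon_sentiment get_emoticon_sentiment get_emoticon_sentiment_alt
  simp only [PySem.Dict.getD_counter, pv_foldl_eq]
  ring
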